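-- pv_equiv track=rewrite | github.com/vikhyatksrivastava/CustomPythonUtilities | src/main/patternprint.py | count_cross
-- ===== SOURCE A (Python) =====
-- from typing import List
--
-- def count_cross(grid: List[str]) -> int:
--     rows = len(grid)
--     cols = len(grid[0])
--
--     if rows < 3 or cols < 3:
--         return 0
--
--     # Precompute horizontal and vertical counts of consecutive 'X'
--     horizontal_counts = [[0] * cols for _ in range(rows)]
--     vertical_counts = [[0] * cols for _ in range(rows)]
--
--     # Fill horizontal counts
--     for i in range(rows):
--         count = 0
--         for j in range(cols):
--             if grid[i][j] == 'X':
--                 count += 1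
--             else:
--                 count = 0
--             horizontal_counts[i][j] = count
--
--     # Fill vertical counts
--     for j in range(cols):
--         count = 0
--         for i in range(rows):
--             if grid[i][j] == 'X':
--                 count += 1
--             else:
--                 count = 0
--             vertical_counts[i][j] = count
--
--     count = 0
--     # Check for plus shapes
--     for i in range(1, rows - 1):
--         for j in range(1, cols - 1):
--             if (grid[i][j] == 'X' and
--                     horizontal_counts[i][j - 1] >= 1 and
--                     horizontal_counts[i][j + 1] >= 1 and
--                     vertical_counts[i - 1][j] >= 1 and
--                     vertical_counts[i + 1][j] >= 1):
--                 count += 1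
--
--     return count
-- ===== SOURCE B (Python) =====
-- from typing import List
--
-- def count_cross(grid: List[str]) -> int:
--     rows = len(grid)
--     cols = len(grid[0])
--     if rows < 3 or cols < 3:
--         return 0
--     total = 0
--     for i in range(1, rows - 1):
--         for j in range(1, cols - 1):
--             if (grid[i][j] == 'X' and grid[i][j - 1] == 'X' and
--                     grid[i][j + 1] == 'X' and grid[i - 1][j] == 'X' and
--                     grid[i + 1][j] == 'X'):
--                 total += 1
--     return total
-- ===== Notes on version B (the rewrite author's own statement) =====
-- stated objective: simpler
-- what changed: Drops both precomputed prefix-count tables and their two fill passes; a single nested loop inspects the center cell and its four neighbors directly.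
import Mathlib
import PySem

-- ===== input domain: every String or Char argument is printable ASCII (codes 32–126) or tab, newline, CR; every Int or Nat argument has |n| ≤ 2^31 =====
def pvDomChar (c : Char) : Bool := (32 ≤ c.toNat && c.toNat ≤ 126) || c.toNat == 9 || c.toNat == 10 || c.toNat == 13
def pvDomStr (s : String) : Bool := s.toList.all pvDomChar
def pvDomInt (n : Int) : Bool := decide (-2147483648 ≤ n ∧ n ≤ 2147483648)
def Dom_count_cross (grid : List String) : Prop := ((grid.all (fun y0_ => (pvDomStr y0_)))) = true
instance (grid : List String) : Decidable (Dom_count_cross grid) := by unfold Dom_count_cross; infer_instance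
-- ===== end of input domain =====

-- B replaces A's two precomputed prefix-count tables with a direct five-neighbor check in a single nested loop (objective: simpler; same asymptotic cost).


-- ===== PORT A =====
-- cell access grid[i][j]; exact for in-range indices, which Pre_count_cross guarantees
def pvCell (grid : List String) (i j : Nat) : Char :=
  ((grid.getD i "").toList).getD j ' '

-- A's 'fill horizontal counts' inner loop over the indices js with running state count
def pvFillH (row : List Char) : Int → List Nat → List Int
  | _, [] => []
  | count, j :: js =>
    let c : Int := if row.getD j ' ' = 'X' then count + 1 else 0
    c :: pvFillH row c js

-- A's 'fill vertical counts' inner loop (column j, indices is, running state count)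
def pvFillV (grid : List String) (j : Nat) : Int → List Nat → List Int
  | _, [] => []
  | count, i :: is =>
    let c : Int := if pvCell grid i j = 'X' then count + 1 else 0
    c :: pvFillV grid j c is

def count_cross (grid : List String) : Int :=
  let rows := grid.length
  let cols := (grid.headD "").toList.length
  if rows < 3 ∨ cols < 3 then 0
  else
    let h : List (List Int) := grid.map (fun row => pvFillH row.toList 0 (List.range cols))
    -- vertical table stored column-major: v[j][i] = vertical_counts[i][j]
    let v : List (List Int) := (List.range cols).map (fun j => pvFillV grid j 0 (List.range rows))
    (List.range' 1 (rows - 2)).foldl (fun acc i =>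
      (List.range' 1 (cols - 2)).foldl (fun acc j =>
        if pvCell grid i j = 'X' ∧
           1 ≤ (h.getD i []).getD (j - 1) 0 ∧
           1 ≤ (h.getD i []).getD (j + 1) 0 ∧
           1 ≤ (v.getD j []).getD (i - 1) 0 ∧
           1 ≤ (v.getD j []).getD (i + 1) 0
        then acc + 1 else acc) acc) 0

-- ===== PORT B =====
def count_cross_alt (grid : List String) : Int :=
  let rows := grid.length
  let cols := (grid.headD "").toList.length
  if rows < 3 ∨ cols < 3 then 0
  else
    (List.range' 1 (rows - 2)).foldl (fun total i =>
      (List.range' 1 (cols - 2)).foldl (fun total j =>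
        if pvCell grid i j = 'X' ∧ pvCell grid i (j - 1) = 'X' ∧
           pvCell grid i (j + 1) = 'X' ∧ pvCell grid (i - 1) j = 'X' ∧
           pvCell grid (i + 1) j = 'X'
        then total + 1 else total) total) 0

-- ===== PRECONDITION & SPEC =====
-- Pre_ excludes exactly the inputs where the Python A raises IndexError: the empty grid
-- (len(grid[0])), and grids with rows ≥ 3 and cols ≥ 3 where some row is shorter than cols
-- (A's precompute passes index every row up to cols-1).
def Pre_count_cross (grid : List String) : Prop :=
  grid ≠ [] ∧
  (grid.length < 3 ∨ (grid.headD "").toList.length < 3 ∨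
   ∀ row ∈ grid, (grid.headD "").toList.length ≤ row.toList.length)
instance (grid : List String) : Decidable (Pre_count_cross grid) := by
  unfold Pre_count_cross; infer_instance
def pvWitness_count_cross : List String := [".X.", "XXX", ".X."]

def Spec_count_cross (grid : List String) (out : Int) : Prop := out = count_cross_alt grid
instance (grid : List String) (out : Int) : Decidable (Spec_count_cross grid out) := by unfold Spec_count_cross; infer_instance

-- ===== CLAIM (what is proved, stated in full; the proofs are below) =====
def Claim_equal_count_cross : Prop := ∀ (grid : List String), Dom_count_cross grid → Pre_count_cross grid → Spec_count_cross grid (count_cross grid)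

-- ===== LEMMAS AND PROOFS =====

theorem count_cross_eq (grid : List String) : count_cross grid =
    if grid.length < 3 ∨ (grid.headD "").toList.length < 3 then 0
    else
      (List.range' 1 (grid.length - 2)).foldl (fun acc i =>
        (List.range' 1 ((grid.headD "").toList.length - 2)).foldl (fun acc j =>
          if pvCell grid i j = 'X' ∧
             1 ≤ (((grid.map (fun row => pvFillH row.toList 0 (List.range (grid.headD "").toList.length))).getD i []).getD (j - 1) 0) ∧
             1 ≤ (((grid.map (fun row => pvFillH row.toList 0 (List.range (grid.headD "").toList.length))).getD i []).getD (j + 1) 0) ∧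
             1 ≤ ((((List.range (grid.headD "").toList.length).map (fun j => pvFillV grid j 0 (List.range grid.length))).getD j []).getD (i - 1) 0) ∧
             1 ≤ ((((List.range (grid.headD "").toList.length).map (fun j => pvFillV grid j 0 (List.range grid.length))).getD j []).getD (i + 1) 0)
          then acc + 1 else acc) acc) 0 := rfl

theorem count_cross_alt_eq (grid : List String) : count_cross_alt grid =
    if grid.length < 3 ∨ (grid.headD "").toList.length < 3 then 0
    else
      (List.range' 1 (grid.length - 2)).foldl (fun total i =>
        (List.range' 1 ((grid.headD "").toList.length - 2)).foldl (fun total j =>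
          if pvCell grid i j = 'X' ∧ pvCell grid i (j - 1) = 'X' ∧
             pvCell grid i (j + 1) = 'X' ∧ pvCell grid (i - 1) j = 'X' ∧
             pvCell grid (i + 1) j = 'X'
          then total + 1 else total) total) 0 := rfl

theorem pv_getD_map {α β : Type} (f : α → β) (l : List α) (i : Nat) (d : α) (d' : β)
    (h : i < l.length) : (l.map f).getD i d' = f (l.getD i d) := by
  induction l generalizing i with
  | nil => simp at h
  | cons a t ih =>
    cases i with
    | zero => simp
    | succ n => simpa using ih n (by simpa using h)

theorem pvFillH_pos (row : List Char) (js : List Nat) :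
    ∀ (count : Int), 0 ≤ count → ∀ k < js.length,
      (1 ≤ (pvFillH row count js).getD k 0 ↔ row.getD (js.getD k 0) ' ' = 'X') := by
  induction js with
  | nil => intro _ _ k hk; simp at hk
  | cons j t ih =>
    intro count hc k hk
    cases k with
    | zero =>
      simp only [pvFillH, List.getD_cons_zero]
      split_ifs with hx
      · exact ⟨fun _ => hx, fun _ => by omega⟩
      · exact ⟨fun h => absurd h (by omega), fun h => absurd h hx⟩
    | succ n =>
      simp only [pvFillH, List.getD_cons_succ]
      exact ih _ (by split_ifs <;> omega) n (by simpa using hk)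

theorem pvFillV_pos (grid : List String) (j : Nat) (is : List Nat) :
    ∀ (count : Int), 0 ≤ count → ∀ k < is.length,
      (1 ≤ (pvFillV grid j count is).getD k 0 ↔ pvCell grid (is.getD k 0) j = 'X') := by
  induction is with
  | nil => intro _ _ k hk; simp at hk
  | cons i t ih =>
    intro count hc k hk
    cases k with
    | zero =>
      simp only [pvFillV, List.getD_cons_zero]
      split_ifs with hx
      · exact ⟨fun _ => hx, fun _ => by omega⟩
      · exact ⟨fun h => absurd h (by omega), fun h => absurd h hx⟩
    | succ n =>
      simp only [pvFillV, List.getD_cons_succ]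
      exact ih _ (by split_ifs <;> omega) n (by simpa using hk)

theorem pv_range_getD (n k : Nat) (h : k < n) : (List.range n).getD k 0 = k := by
  simp [List.getD, h]

-- ===== VERDICT (by name: the statement is the Claim_ definition above) =====
theorem count_cross_spec : Claim_equal_count_cross := by
  intro grid _ hpre
  unfold Spec_count_cross
  rw [count_cross_eq, count_cross_alt_eq]
  by_cases hsmall : grid.length < 3 ∨ (grid.headD "").toList.length < 3
  · rw [if_pos hsmall, if_pos hsmall]
  · rw [if_neg hsmall, if_neg hsmall]
    push Not at hsmall
    obtain ⟨hr3, hc3⟩ := hsmall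
    set cols := (grid.headD "").toList.length with hcols
    set rows := grid.length with hrows
    apply PySem.List.foldl_congr_mem
    intro acc i hi
    apply PySem.List.foldl_congr_mem
    intro acc j hj
    rw [List.mem_range'] at hi hj
    obtain ⟨ki, hki, rfl⟩ := hi
    obtain ⟨kj, hkj, rfl⟩ := hj
    set i := 1 + 1 * ki with hidef
    set j := 1 + 1 * kj with hjdef
    have hi1 : 1 ≤ i := by omega
    have hi2 : i < rows - 1 := by omega
    have hj1 : 1 ≤ j := by omega
    have hj2 : j < cols - 1 := by omega
    have hirange : i < rows := by omega
    have hjrange : j < cols := by omega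
    -- horizontal table, row i
    have hHat : ∀ k, k < cols →
        (1 ≤ ((grid.map (fun row => pvFillH row.toList 0 (List.range cols))).getD i []).getD k 0 ↔
          pvCell grid i k = 'X') := by
      intro k hk
      rw [pv_getD_map (fun row => pvFillH row.toList 0 (List.range cols)) grid i "" [] hirange]
      have h := pvFillH_pos ((grid.getD i "").toList) (List.range cols) 0 le_rfl k
        (by simpa using hk)
      rw [pv_range_getD cols k hk] at h
      exact h
    -- vertical table, column j
    have hVat : ∀ k, k < rows →
        (1 ≤ (((List.range cols).map (fun j => pvFillV grid j 0 (List.range rows))).getD j []).getD k 0 ↔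
          pvCell grid k j = 'X') := by
      intro k hk
      rw [pv_getD_map (fun j => pvFillV grid j 0 (List.range rows)) (List.range cols) j 0 [] (by simpa using hjrange),
        pv_range_getD cols j hjrange]
      have h := pvFillV_pos grid j (List.range rows) 0 le_rfl k (by simpa using hk)
      rw [pv_range_getD rows k hk] at h
      exact h
    have e1 := hHat (j - 1) (by omega)
    have e2 := hHat (j + 1) (by omega)
    have e3 := hVat (i - 1) (by omega)
    have e4 := hVat (i + 1) (by omega)
    apply if_congr _ rfl rfl
    constructor
    · rintro ⟨h0, h1, h2, h3, h4⟩
      exact ⟨h0, e1.1 h1, e2.1 h2, e3.1 h3, e4.1 h4⟩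
    · rintro ⟨h0, h1, h2, h3, h4⟩
      exact ⟨h0, e1.2 h1, e2.2 h2, e3.2 h3, e4.2 h4⟩
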